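-- pv_equiv track=rewrite | github.com/DarkGlowing/Project | main.py | count_digits_before_operator
-- ===== SOURCE A (Python) =====
-- def count_digits_before_operator(formula):
--     count = 0
--     i = len(formula) - 1
--     while i >= 0 and formula[i] not in ['+', '-', '*', '/', '(', ')', '**2', '.', '√x']:
--         if formula[i].isdigit():
--             count += 1
--         i -= 1
--     return count
-- ===== SOURCE B (Python) =====
-- def count_digits_before_operator(formula):
--     # Forward single pass: reset the digit counter at every operator/stop char,
--     # so at the end it holds the digit count of the trailing stop-free segment.
--     count = 0
--     for ch in formula:
--         if ch in '+-*/().':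
--             count = 0
--         elif ch.isdigit():
--             count += 1
--     return count
-- ===== Notes on version B (the rewrite author's own statement) =====
-- stated objective: alternative
-- what changed: Replaces A's backward index-based scan that stops at the first operator with a forward single pass over the characters that resets the digit counter at every operator/stop character, so the final counter is the digit count of the trailing stop-free segment.
import Mathlib
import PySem

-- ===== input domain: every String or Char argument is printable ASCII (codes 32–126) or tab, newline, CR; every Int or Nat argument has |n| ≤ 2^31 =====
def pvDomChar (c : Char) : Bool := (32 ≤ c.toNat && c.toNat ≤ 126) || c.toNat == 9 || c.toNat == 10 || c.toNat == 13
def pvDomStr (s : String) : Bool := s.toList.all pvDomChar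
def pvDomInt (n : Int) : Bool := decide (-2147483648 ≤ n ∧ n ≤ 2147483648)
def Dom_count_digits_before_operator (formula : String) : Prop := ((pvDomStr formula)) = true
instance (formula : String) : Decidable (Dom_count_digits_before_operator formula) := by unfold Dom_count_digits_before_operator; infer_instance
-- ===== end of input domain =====

-- B replaces A's backward stop-at-operator scan by a forward single pass that resets
-- the counter at each operator char (objective: alternative decomposition, same cost).

-- ===== PORT A =====
-- A's while loop walks i from the end down, stopping at the first stop char:
-- transliterated as recursion over the reversed character list with the same state.
def pvCountA : List Char → Int → Int
  | [], count => count
  | c :: rest, count =>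
    if ["+", "-", "*", "/", "(", ")", "**2", ".", "√x"].contains (String.singleton c) then count
    else pvCountA rest (count + (if PySem.Chars.isdigit c then 1 else 0))

def count_digits_before_operator (formula : String) : Int :=
  pvCountA formula.toList.reverse 0

-- ===== PORT B =====
def count_digits_before_operator_alt (formula : String) : Int :=
  formula.toList.foldl
    (fun count ch =>
      if PySem.Chars.isIn [ch] ("+-*/().".toList) then 0
      else if PySem.Chars.isdigit ch then count + 1 else count) 0

-- ===== PRECONDITION & SPEC =====
def Spec_count_digits_before_operator (formula : String) (out : Int) : Prop := out = count_digits_before_operator_alt formula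
instance (formula : String) (out : Int) : Decidable (Spec_count_digits_before_operator formula out) := by unfold Spec_count_digits_before_operator; infer_instance

-- ===== CLAIM (what is proved, stated in full; the proofs are below) =====
def Claim_equal_count_digits_before_operator : Prop := ∀ (formula : String), Dom_count_digits_before_operator formula → Spec_count_digits_before_operator formula (count_digits_before_operator formula)

-- ===== LEMMAS AND PROOFS =====

-- A's per-character stop test (1-char string against the string list, dead entries
-- "**2"/"√x" never matching) agrees with B's char-in-string test.
theorem pv_stop_eq (c : Char) :
    (["+", "-", "*", "/", "(", ")", "**2", ".", "√x"].contains (String.singleton c))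
      = PySem.Chars.isIn [c] ("+-*/().".toList) := by
  rw [Bool.eq_iff_iff]
  simp only [List.contains_eq_mem, decide_eq_true_eq,
    PySem.Chars.isIn_iff_infix, List.singleton_infix_iff]
  simp [String.singleton, String.ext_iff]

theorem pvCountA_acc (l : List Char) (a : Int) : pvCountA l a = a + pvCountA l 0 := by
  induction l generalizing a with
  | nil => simp [pvCountA]
  | cons c rest ih =>
    simp only [pvCountA]
    split_ifs with h
    · simp
    · rw [ih (a + 1), ih (0 + 1)]; ring
    · simpa using ih a

theorem pv_main (l : List Char) :
    (l.foldl
      (fun count ch =>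
        if PySem.Chars.isIn [ch] ("+-*/().".toList) then 0
        else if PySem.Chars.isdigit ch then count + 1 else count) 0)
      = pvCountA l.reverse 0 := by
  induction l using List.reverseRecOn with
  | nil => simp [pvCountA]
  | append_singleton l a ih =>
    rw [List.foldl_append, List.foldl_cons, List.foldl_nil, List.reverse_append,
      List.reverse_singleton, List.singleton_append]
    simp only [pvCountA, pv_stop_eq]
    split_ifs with h hd
    · rfl
    · rw [pvCountA_acc, ← ih]; omega
    · rw [pvCountA_acc, ← ih]; omega

-- ===== VERDICT (by name: the statement is the Claim_ definition above) =====
theorem count_digits_before_operator_spec : Claim_equal_count_digits_before_operator := by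
  intro f _
  unfold Spec_count_digits_before_operator count_digits_before_operator count_digits_before_operator_alt
  exact (pv_main f.toList).symm
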